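-- pv_equiv track=rewrite | github.com/d1zm4as/CodeWars | Python/6 Kyu/separating_strings.py | sep_str
-- ===== SOURCE A (Python) =====
-- def sep_str(s):
--     words = s.split() # separa a string em palavras
--     max_len = max(len(word) for word in words) # pega o comprimento da palavra mais longa
--     result = [['' for _ in range(len(words))] for _ in range(max_len)] # cria uma matriz de strings vazias com o número de linhas igual ao comprimento da palavra mais longa e o número de colunas igual ao número de palavras
--
--     for i, word in enumerate(words): # esse loop percorre cada palavra e seu índice e preenche a matriz result com os caracteres correspondentes
--         for j, char in enumerate(word):
--             result[j][i] = char
--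
--     return result
-- ===== SOURCE B (Python) =====
-- def sep_str(s):
--     rows = []
--     for k, w in enumerate(s.split()):
--         for j, ch in enumerate(w):
--             if j == len(rows):
--                 rows.append([''] * k)
--             rows[j].append(ch)
--         for j in range(len(w), len(rows)):
--             rows[j].append('')
--     return rows
-- ===== Notes on version B (the rewrite author's own statement) =====
-- stated objective: alternative
-- what changed: B builds the transpose online in a single pass over the words: it folds each word into a growing list of rows, appending one cell per row and creating new padded rows on the fly, instead of computing max_len up front, pre-allocating a fixed grid and scatter-writing every character into its transposed cell.
import Mathlib
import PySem

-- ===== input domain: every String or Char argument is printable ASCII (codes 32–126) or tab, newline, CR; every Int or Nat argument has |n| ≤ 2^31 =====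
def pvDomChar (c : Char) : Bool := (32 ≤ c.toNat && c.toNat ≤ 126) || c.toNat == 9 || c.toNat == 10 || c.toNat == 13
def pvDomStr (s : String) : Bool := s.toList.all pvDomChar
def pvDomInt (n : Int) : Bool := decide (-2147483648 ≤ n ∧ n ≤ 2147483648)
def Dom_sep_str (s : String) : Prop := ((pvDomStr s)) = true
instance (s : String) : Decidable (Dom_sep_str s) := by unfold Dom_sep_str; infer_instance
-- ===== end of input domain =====

-- B builds the transpose online in a single pass over the words (growing the row list on the fly)
-- instead of A's precomputed max_len + pre-allocated grid + scatter writes; same cost, different algorithm.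


-- ===== PORT A =====
-- inner loop of A: 'for j, char in enumerate(word): result[j][i] = char'
def pvWriteWord (col : Nat) (g : List (List String)) (cs : List Char) : List (List String) :=
  (PySem.List.enumerate cs).foldl
    (fun g p => g.modify p.1.toNat (fun row => row.set col (String.singleton p.2))) g

def sep_str (s : String) : List (List String) :=
  let words := PySem.Str.split₀ s
  match PySem.List.max? (words.map (fun w => PySem.Str.len w)) (fun x => x) with
  | none => []  -- Python raises ValueError here (max of an empty sequence); excluded by Pre_
  | some maxLen =>
    let result := List.replicate maxLen.toNat (List.replicate words.length "")
    (PySem.List.enumerate words).foldl (fun g p => pvWriteWord p.1.toNat g p.2.toList) result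

-- ===== PORT B =====
-- inner loop of B: 'for j, ch in enumerate(w): if j == len(rows): rows.append(['']*k); rows[j].append(ch)'
def pvStepChar (k : Nat) (rows : List (List String)) (p : Int × Char) : List (List String) :=
  let rows := if p.1 = (rows.length : Int) then rows ++ [List.replicate k ""] else rows
  rows.modify p.1.toNat (fun r => r ++ [String.singleton p.2])

-- one iteration of B's outer loop: fold the word in, then pad the remaining rows with ''
def pvStepWord (rows : List (List String)) (p : Int × String) : List (List String) :=
  let rows := (PySem.List.enumerate p.2.toList).foldl (pvStepChar p.1.toNat) rows
  (PySem.List.pyRange (PySem.Str.len p.2) (rows.length : Int) 1).foldl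
    (fun rows j => rows.modify j.toNat (fun r => r ++ [""])) rows

def sep_str_alt (s : String) : List (List String) :=
  (PySem.List.enumerate (PySem.Str.split₀ s)).foldl pvStepWord []

-- ===== PRECONDITION & SPEC =====
-- Pre_ excludes inputs with no words (empty or all-whitespace string): there Python's
-- max(len(word) for word in words) raises ValueError in A.
def Pre_sep_str (s : String) : Prop := PySem.Str.split₀ s ≠ []
instance (s : String) : Decidable (Pre_sep_str s) := by unfold Pre_sep_str; infer_instance
def pvWitness_sep_str : String := "ab c"

def Spec_sep_str (s : String) (out : List (List String)) : Prop := out = sep_str_alt s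
instance (s : String) (out : List (List String)) : Decidable (Spec_sep_str s out) := by unfold Spec_sep_str; infer_instance

-- ===== CLAIM (what is proved, stated in full; the proofs are below) =====
def Claim_equal_sep_str : Prop := ∀ (s : String), Dom_sep_str s → Pre_sep_str s → Spec_sep_str s (sep_str s)

-- ===== LEMMAS AND PROOFS =====

-- the common characterisation both ports are proved equal to: row j lists the j-th character
-- (or '') of every word
def pvCell (w : String) (j : Nat) : String :=
  if j < w.toList.length then String.singleton (w.toList.getD j ' ') else ""

def pvGather (ws : List String) (m : Nat) : List (List String) :=
  (List.range m).map (fun j => ws.map (fun w => pvCell w j))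

def pvMaxL (ws : List String) : Nat := ws.foldl (fun n w => max n w.toList.length) 0

-- ---- A-side lemmas ----

theorem write_row (col : Nat) (g : List (List String)) (cs : List Char) (j : Nat) :
    (pvWriteWord col g cs)[j]? = (g[j]?).map
      (fun row => if j < cs.length then row.set col (String.singleton (cs.getD j ' ')) else row) := by
  induction cs using List.reverseRecOn with
  | nil => simp [pvWriteWord, PySem.List.enumerate_nil]
  | append_singleton cs c ih =>
      rw [show pvWriteWord col g (cs ++ [c]) =
        (pvWriteWord col g cs).modify cs.length (fun row => row.set col (String.singleton c)) by
          simp [pvWriteWord, PySem.List.enumerate_append]]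
      rw [List.getElem?_modify, ih]
      have hne : cs.length ≠ j → (cs.length = j) = False := by
        intro h; simp [h]
      by_cases h : j = cs.length
      · subst h; simp
      · rcases Nat.lt_or_ge j cs.length with hlt | hge
        · simp [hne (Ne.symm h), hlt, Nat.lt_succ_of_lt hlt]
        · have h1 : ¬ j < cs.length := by omega
          have h2 : ¬ j < cs.length + 1 := by omega
          simp [hne (Ne.symm h), h1, h2]

theorem scatter_row (ws : List String) (g : List (List String)) (i0 : Int) (j : Nat) :
    ((PySem.List.enumerate ws i0).foldl (fun g p => pvWriteWord p.1.toNat g p.2.toList) g)[j]?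
    = (g[j]?).map (fun row => (PySem.List.enumerate ws i0).foldl
        (fun row p => if j < p.2.toList.length then
            row.set p.1.toNat (String.singleton (p.2.toList.getD j ' ')) else row) row) := by
  induction ws generalizing g i0 with
  | nil => simp [PySem.List.enumerate_nil]
  | cons w ws ih =>
      simp only [PySem.List.enumerate_cons, List.foldl_cons, ih, write_row, Option.map_map]
      rfl

theorem getD_set_ne (l : List String) (n m : Nat) (a : String) (h : n ≠ m) :
    (l.set n a).getD m "" = l.getD m "" := by
  simp [List.getD_eq_getElem?_getD, List.getElem?_set_ne h]

theorem getD_set_self (l : List String) (n : Nat) (a : String) (h : n < l.length) :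
    (l.set n a).getD n "" = a := by
  simp [List.getD_eq_getElem?_getD, h]

theorem applyW_length (ws : List String) (j : Nat) (row : List String) (i0 : Int) :
    ((PySem.List.enumerate ws i0).foldl (fun row p => if j < p.2.toList.length then
        row.set p.1.toNat (String.singleton (p.2.toList.getD j ' ')) else row) row).length
    = row.length := by
  induction ws generalizing row i0 with
  | nil => simp [PySem.List.enumerate_nil]
  | cons w ws ih =>
      simp only [PySem.List.enumerate_cons, List.foldl_cons, ih]
      split <;> simp

theorem applyW_getD (ws : List String) (j : Nat) (row : List String) (i0 : Nat) (i : Nat)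
    (hi : i < row.length) :
    ((PySem.List.enumerate ws (i0:Int)).foldl (fun row p => if j < p.2.toList.length then
        row.set p.1.toNat (String.singleton (p.2.toList.getD j ' ')) else row) row).getD i ""
    = if i0 ≤ i ∧ i - i0 < ws.length ∧ j < ((ws.getD (i-i0) "").toList.length)
      then String.singleton ((ws.getD (i-i0) "").toList.getD j ' ') else row.getD i "" := by
  induction ws generalizing row i0 with
  | nil =>
      rw [PySem.List.enumerate_nil]
      simp only [List.foldl_nil, List.length_nil]
      rw [if_neg (by omega)]
  | cons w ws ih =>
      rw [PySem.List.enumerate_cons]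
      simp only [List.foldl_cons]
      have hcast : (i0 : Int) + 1 = ((i0 + 1 : Nat) : Int) := by push_cast; ring
      set row' := (if j < w.toList.length then
        row.set (i0:Int).toNat (String.singleton (w.toList.getD j ' ')) else row) with hrow'
      have hlen' : i < row'.length := by
        rw [hrow']; split <;> simp [hi]
      have htn : ((i0:Int)).toNat = i0 := by omega
      rw [hcast, ih row' (i0+1) hlen']
      rcases Nat.lt_trichotomy i i0 with hlt | heq | hgt
      · rw [if_neg (by omega), if_neg (by omega), hrow']
        split
        · rw [htn, getD_set_ne _ _ _ _ (by omega)]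
        · rfl
      · subst heq
        rw [if_neg (by omega)]
        have h0 : i - i = 0 := by omega
        rw [h0, List.getD_cons_zero]
        by_cases hj : j < w.toList.length
        · rw [if_pos ⟨by omega, by simp, hj⟩, hrow', if_pos hj, htn, getD_set_self _ _ _ hi]
        · rw [if_neg (fun hC => hj hC.2.2), hrow', if_neg hj]
      · have hd : i - i0 = (i - (i0+1)) + 1 := by omega
        rw [hd, List.getD_cons_succ]
        have hiff : ((i0+1 ≤ i ∧ i - (i0+1) < ws.length ∧ j < ((ws.getD (i-(i0+1)) "").toList.length))
            ↔ (i0 ≤ i ∧ (i - (i0+1)) + 1 < (w::ws).length ∧ j < ((ws.getD (i-(i0+1)) "").toList.length))) := by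
          simp only [List.length_cons]; omega
        rw [if_congr hiff rfl rfl]
        split
        · rfl
        · rw [hrow']
          split
          · rw [htn, getD_set_ne _ _ _ _ (by omega)]
          · rfl

-- running Int max over string lengths = cast of the running Nat max
theorem maxInt_cast (ws : List String) (a : Nat) :
    (ws.map (fun w => PySem.Str.len w)).foldl max ((a:Int)) =
      ((ws.foldl (fun n w => max n w.toList.length) a : Nat) : Int) := by
  induction ws generalizing a with
  | nil => simp
  | cons w ws ih =>
      simp only [List.map_cons, List.foldl_cons]
      rw [show max ((a:Int)) (PySem.Str.len w) = (((max a w.toList.length : Nat)):Int) by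
        rw [PySem.Str.len_eq, String.length_toList, Nat.cast_max]]
      exact ih _

-- A's port equals the common characterisation
theorem sep_str_eq_gather (s : String) (m : Int)
    (hmax : PySem.List.max? ((PySem.Str.split₀ s).map (fun w => PySem.Str.len w)) (fun x => x) = some m) :
    sep_str s = pvGather (PySem.Str.split₀ s) m.toNat := by
  simp only [sep_str, hmax]
  set words := PySem.Str.split₀ s with hw
  set N := words.length with hN
  apply List.ext_getElem?
  intro j
  rw [show (PySem.List.enumerate words) = PySem.List.enumerate words (0:Int) from rfl,
    scatter_row]
  rcases Nat.lt_or_ge j m.toNat with hj | hj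
  · rw [List.getElem?_replicate, if_pos hj]
    simp only [Option.map_some]
    rw [show (pvGather words m.toNat)[j]? = some (words.map (fun w => pvCell w j)) from by
      simp [pvGather, hj]]
    congr 1
    apply List.ext_getElem
    · rw [applyW_length]; simp only [List.length_replicate, List.length_map]; exact hN
    intro i hi1 hi2
    have hiN : i < N := by simpa using hi2
    have hlen : i < (List.replicate N ("":String)).length := by simpa using hiN
    rw [← List.getD_eq_getElem _ "" hi1, ← List.getD_eq_getElem _ "" hi2]
    rw [show ((0:Int) = ((0:Nat):Int)) from rfl, applyW_getD _ _ _ _ _ hlen]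
    have h0 : i - 0 = i := rfl
    have hiw : i < words.length := hN ▸ hiN
    have hwi : words.getD i "" = words[i] := by
      simp [List.getD_eq_getElem?_getD, List.getElem?_eq_getElem hiw]
    rw [h0, hwi, List.getD_eq_getElem _ "" hi2, List.getElem_map, pvCell]
    by_cases hc : j < words[i].toList.length
    · rw [if_pos ⟨Nat.zero_le i, hiw, hc⟩, if_pos hc]
    · rw [if_neg (fun hC => hc hC.2.2), if_neg hc]
      simp [List.getD_eq_getElem?_getD, hiN]
  · rw [List.getElem?_replicate, if_neg (by omega)]
    simp only [Option.map_none]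
    symm
    rw [List.getElem?_eq_none]
    simp [pvGather]
    omega

-- ---- B-side lemmas ----

theorem map_range_getD (rows : List (List String)) :
    (List.range rows.length).map (fun j => rows.getD j []) = rows := by
  apply List.ext_getElem
  · simp
  · intro j h1 h2
    simp [List.getD_eq_getElem?_getD, List.getElem?_eq_getElem h2]

-- state of B's inner character loop, in closed form
def pvF (rows : List (List String)) (k : Nat) (cs : List Char) : List (List String) :=
  (List.range (max rows.length cs.length)).map (fun j =>
    (if j < rows.length then rows.getD j [] else List.replicate k "") ++
    (if j < cs.length then [String.singleton (cs.getD j ' ')] else []))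

theorem pvF_get (rows : List (List String)) (k : Nat) (cs : List Char) (j : Nat) :
    (pvF rows k cs)[j]? =
      if j < max rows.length cs.length then
        some ((if j < rows.length then rows.getD j [] else List.replicate k "") ++
              (if j < cs.length then [String.singleton (cs.getD j ' ')] else []))
      else none := by
  by_cases h : j < max rows.length cs.length
  · simp [pvF, h]
  · rw [if_neg h]
    rw [List.getElem?_eq_none]
    simp [pvF]
    omega

theorem pvF_len (rows : List (List String)) (k : Nat) (cs : List Char) :
    (pvF rows k cs).length = max rows.length cs.length := by
  simp [pvF]

theorem phase1 (cs : List Char) (rows : List (List String)) (k : Nat) :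
    (PySem.List.enumerate cs).foldl (pvStepChar k) rows = pvF rows k cs := by
  induction cs using List.reverseRecOn with
  | nil =>
      simp only [PySem.List.enumerate_nil, List.foldl_nil, pvF, List.length_nil, Nat.max_zero]
      conv_lhs => rw [← map_range_getD rows]
      apply List.map_congr_left
      intro j hj
      simp only [List.mem_range] at hj
      simp [hj]
  | append_singleton cs c ih =>
      rw [show (PySem.List.enumerate (cs ++ [c])) =
            PySem.List.enumerate cs ++ [((cs.length : Int), c)] by
          rw [show (PySem.List.enumerate (cs ++ [c])) = PySem.List.enumerate (cs ++ [c]) 0 from rfl,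
            PySem.List.enumerate_append]
          simp [PySem.List.enumerate_cons, PySem.List.enumerate_nil]]
      rw [List.foldl_append, ih]
      simp only [List.foldl_cons, List.foldl_nil]
      set M := rows.length with hM
      set L := cs.length with hL
      apply List.ext_getElem?
      intro j
      simp only [pvStepChar]
      have htn : ((L:Int)).toNat = L := by omega
      rw [pvF_get rows k (cs ++ [c]) j]
      have hlenA : (cs ++ [c]).length = L + 1 := by simp; omega
      rw [hlenA]
      rcases Nat.lt_or_ge L M with hLM | hML
      · -- no new row is appended
        have hmax : max M (L + 1) = max M L := by omega
        rw [if_neg (show ¬ ((L:Int) = ((pvF rows k cs).length : Int)) by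
          rw [pvF_len, ← hM, ← hL]; omega)]
        rw [htn, List.getElem?_modify, pvF_get, ← hM, ← hL, hmax]
        by_cases hj : j < max M L
        · rw [if_pos hj, if_pos hj]
          simp only [Option.map_eq_map, Option.map_some, Option.some.injEq]
          by_cases hjL : L = j
          · subst hjL
            rw [if_pos rfl]
            rw [if_neg (by omega : ¬ L < L), if_pos (by omega : L < L + 1)]
            rw [List.getD_append_right cs [c] ' ' L (le_refl L),
              show L - cs.length = 0 from by omega]
            simp
          · rw [if_neg hjL]
            congr 1
            by_cases hjc : j < L
            · rw [if_pos hjc, if_pos (by omega : j < L + 1),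
                List.getD_append cs [c] ' ' j (by omega)]
            · rw [if_neg hjc, if_neg (by omega : ¬ j < L + 1)]
        · rw [if_neg hj, if_neg hj]; rfl
      · -- the word outgrows the rows: a new padded row is appended, then written
        have hmax : max M (L + 1) = L + 1 := by omega
        have hmax0 : max M L = L := by omega
        rw [if_pos (show ((L:Int) = ((pvF rows k cs).length : Int)) by
          rw [pvF_len, ← hM, ← hL, hmax0])]
        rw [htn, List.getElem?_modify, hmax]
        rcases Nat.lt_trichotomy j L with hjL | hjL | hjL
        · rw [List.getElem?_append_left (by rw [pvF_len, ← hM, ← hL, hmax0]; exact hjL)]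
          rw [pvF_get, ← hM, ← hL, hmax0, if_pos hjL, if_pos (by omega : j < L + 1)]
          simp only [Option.map_eq_map, Option.map_some, Option.some.injEq]
          rw [if_neg (by omega : ¬ L = j), if_pos hjL,
            List.getD_append cs [c] ' ' j (by omega)]
          rw [if_pos (show j < L + 1 from by omega)]
        · subst hjL
          rw [List.getElem?_append_right (by rw [pvF_len, ← hM, ← hL, hmax0])]
          rw [pvF_len, ← hM, ← hL, hmax0, Nat.sub_self,
            List.getD_append_right cs [c] ' ' L (le_refl L),
            show L - cs.length = 0 from by omega]
          simp [show ¬ L < M from by omega]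
        · rw [if_neg (by omega : ¬ j < L + 1)]
          rw [List.getElem?_eq_none (by simp [pvF_len, ← hM, ← hL, hmax0]; omega)]
          rfl

theorem phase2 (a b : Int) (h0 : 0 ≤ a) (R : List (List String)) (j : Nat) :
    ((PySem.List.pyRange a b 1).foldl (fun rows i => rows.modify i.toNat (fun r => r ++ [""])) R)[j]?
    = R[j]?.map (fun r => if a ≤ (j:Int) ∧ (j:Int) < b then r ++ [""] else r) := by
  by_cases hab : a < b
  · obtain ⟨n, hn⟩ : ∃ n : Nat, b - a = (n:Int) := ⟨(b-a).toNat, by omega⟩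
    induction n generalizing a R with
    | zero => omega
    | succ n ih =>
        rw [PySem.List.pyRange_one_cons hab, List.foldl_cons]
        by_cases hab2 : a + 1 < b
        · rw [ih (a+1) (by omega) _ hab2 (by omega), List.getElem?_modify]
          cases R[j]? with
          | none => rfl
          | some r =>
              simp only [Option.map_eq_map, Option.map_some, Option.some.injEq]
              have ha : (a.toNat = j) ↔ (a = (j:Int)) := by omega
              by_cases hj : a = (j:Int)
              · rw [if_pos (ha.mpr hj),
                  if_neg (show ¬ (a + 1 ≤ (j:Int) ∧ (j:Int) < b) from by omega),
                  if_pos (show a ≤ (j:Int) ∧ (j:Int) < b from by omega)]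
              · rw [if_neg (fun h => hj (ha.mp h))]
                by_cases h1 : a ≤ (j:Int) ∧ (j:Int) < b
                · rw [if_pos (show a + 1 ≤ (j:Int) ∧ (j:Int) < b from by omega), if_pos h1]
                · rw [if_neg (show ¬ (a + 1 ≤ (j:Int) ∧ (j:Int) < b) from by omega), if_neg h1]
        · rw [show PySem.List.pyRange (a+1) b 1 = [] by
            simp [PySem.List.pyRange]; omega]
          simp only [List.foldl_nil, List.getElem?_modify]
          cases R[j]? with
          | none => rfl
          | some r =>
              simp only [Option.map_eq_map, Option.map_some, Option.some.injEq]
              have ha : (a.toNat = j) ↔ (a = (j:Int)) := by omega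
              by_cases hj : a = (j:Int)
              · rw [if_pos (ha.mpr hj), if_pos (show a ≤ (j:Int) ∧ (j:Int) < b from by omega)]
              · rw [if_neg (fun h => hj (ha.mp h)),
                  if_neg (show ¬ (a ≤ (j:Int) ∧ (j:Int) < b) from by omega)]
  · rw [show PySem.List.pyRange a b 1 = [] by
      simp [PySem.List.pyRange]; omega]
    simp only [List.foldl_nil]
    cases R[j]? with
    | none => rfl
    | some r =>
        simp only [Option.map_some, Option.some.injEq]
        rw [if_neg (by omega)]

theorem le_maxL_init (ws : List String) (a : Nat) :
    a ≤ ws.foldl (fun n w => max n w.toList.length) a := by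
  induction ws generalizing a with
  | nil => simp
  | cons w ws ih =>
      simp only [List.foldl_cons]
      exact le_trans (le_max_left _ _) (ih _)

theorem mem_le_maxL (ws : List String) (a : Nat) (w : String) (hw : w ∈ ws) :
    w.toList.length ≤ ws.foldl (fun n w => max n w.toList.length) a := by
  induction ws generalizing a with
  | nil => cases hw
  | cons w2 ws ih =>
      simp only [List.foldl_cons]
      rcases List.mem_cons.mp hw with h | h
      · subst h; exact le_trans (le_max_right _ _) (le_maxL_init _ _)
      · exact ih _ h

theorem gather_len (ws : List String) (m : Nat) : (pvGather ws m).length = m := by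
  simp [pvGather]

theorem gather_getD (ws : List String) (m j : Nat) (hj : j < m) :
    (pvGather ws m).getD j [] = ws.map (fun w => pvCell w j) := by
  simp [pvGather, List.getD_eq_getElem?_getD, List.getElem?_range hj]

theorem map_cell_pad (ws : List String) (j : Nat) (hj : pvMaxL ws ≤ j) :
    ws.map (fun w => pvCell w j) = List.replicate ws.length "" := by
  rw [List.eq_replicate_iff]
  refine ⟨by simp, ?_⟩
  intro b hb
  rcases List.mem_map.mp hb with ⟨w, hw, hwb⟩
  have := mem_le_maxL ws 0 w hw
  rw [← hwb, pvCell, if_neg (by unfold pvMaxL at hj; omega)]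

theorem stepWord_gather (ws : List String) (w : String) :
    pvStepWord (pvGather ws (pvMaxL ws)) ((ws.length : Int), w)
      = pvGather (ws ++ [w]) (pvMaxL (ws ++ [w])) := by
  set M := pvMaxL ws with hMdef
  set L := w.toList.length with hLdef
  have hML : pvMaxL (ws ++ [w]) = max M L := by
    simp only [pvMaxL, List.foldl_append, List.foldl_cons, List.foldl_nil]
    rfl
  simp only [pvStepWord, phase1]
  have hGlen : (pvGather ws M).length = M := gather_len ws M
  have hLen : PySem.Str.len w = (L : Int) := by
    rw [PySem.Str.len_eq, hLdef, String.length_toList]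
  have hk : ((ws.length : Int)).toNat = ws.length := by omega
  apply List.ext_getElem?
  intro j
  rw [hLen, hk, phase2 _ _ (by omega), pvF_get, pvF_len, hGlen, ← hLdef]
  by_cases hj : j < max M L
  · rw [if_pos hj]
    simp only [Option.map_some]
    rw [show (pvGather (ws ++ [w]) (pvMaxL (ws ++ [w])))[j]?
          = some ((ws ++ [w]).map (fun w2 => pvCell w2 j)) by
      simp only [pvGather, List.getElem?_map]
      rw [List.getElem?_range (show j < pvMaxL (ws ++ [w]) from by rw [hML]; exact hj)]
      rfl]
    congr 1
    rw [List.map_append, List.map_singleton]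
    have hpre : (if j < M then (pvGather ws M).getD j [] else List.replicate ws.length "")
        = ws.map (fun w2 => pvCell w2 j) := by
      by_cases hjM : j < M
      · rw [if_pos hjM, gather_getD ws M j hjM]
      · rw [if_neg hjM, map_cell_pad ws j (by omega)]
    by_cases hjL : j < L
    · rw [if_pos hjL,
        if_neg (show ¬ ((L:Int) ≤ (j:Int) ∧ (j:Int) < ((max M L : Nat):Int)) from by omega),
        hpre, pvCell, ← hLdef, if_pos hjL]
    · rw [if_neg hjL,
        if_pos (show ((L:Int) ≤ (j:Int) ∧ (j:Int) < ((max M L : Nat):Int)) from by omega),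
        List.append_nil, hpre, pvCell, ← hLdef, if_neg hjL]
  · rw [if_neg hj]
    simp only [Option.map_none]
    symm
    rw [List.getElem?_eq_none (by rw [gather_len, hML]; omega)]

theorem foldl_gather (ws : List String) :
    (PySem.List.enumerate ws).foldl pvStepWord [] = pvGather ws (pvMaxL ws) := by
  induction ws using List.reverseRecOn with
  | nil => simp [PySem.List.enumerate_nil, pvGather, pvMaxL]
  | append_singleton ws w ih =>
      rw [show PySem.List.enumerate (ws ++ [w]) = PySem.List.enumerate ws ++ [((ws.length : Int), w)] by
        rw [show PySem.List.enumerate (ws ++ [w]) = PySem.List.enumerate (ws ++ [w]) 0 from rfl,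
          PySem.List.enumerate_append]
        simp [PySem.List.enumerate_cons, PySem.List.enumerate_nil]]
      rw [List.foldl_append, ih]
      simp only [List.foldl_cons, List.foldl_nil]
      exact stepWord_gather ws w

theorem alt_eq_gather (s : String) :
    sep_str_alt s = pvGather (PySem.Str.split₀ s) (pvMaxL (PySem.Str.split₀ s)) := by
  simp only [sep_str_alt]
  exact foldl_gather _

theorem sep_str_eq_alt (s : String) : sep_str s = sep_str_alt s := by
  cases hmax : PySem.List.max? ((PySem.Str.split₀ s).map (fun w => PySem.Str.len w)) (fun x => x) with
  | none =>
      have hnil : PySem.Str.split₀ s = [] :=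
        List.map_eq_nil_iff.mp ((PySem.List.max?_eq_none_iff _ _).mp hmax)
      simp [sep_str, sep_str_alt, hmax, hnil, PySem.List.enumerate_nil,
        (PySem.List.max?_eq_none_iff ([] : List Int) (fun x => x)).mpr rfl]
  | some m =>
      rw [alt_eq_gather, sep_str_eq_gather s m hmax]
      cases hws : PySem.Str.split₀ s with
      | nil => rw [hws] at hmax; simp [PySem.List.max?] at hmax
      | cons w0 rest =>
          rw [hws] at hmax
          rw [List.map_cons, PySem.List.max?_id_cons, Option.some.injEq] at hmax
          congr 1
          rw [← hmax]
          rw [show PySem.Str.len w0 = ((w0.toList.length : Nat) : Int) by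
            rw [PySem.Str.len_eq, String.length_toList]]
          rw [maxInt_cast rest w0.toList.length]
          rw [Int.toNat_natCast]
          simp only [pvMaxL, List.foldl_cons, Nat.zero_max]

-- ===== VERDICT (by name: the statement is the Claim_ definition above) =====
theorem sep_str_spec : Claim_equal_sep_str := by
  intro s _ _
  exact sep_str_eq_alt s
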